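-- pv_equiv track=rewrite | github.com/tangarts/advent-of-code | 2020/day11.py | part2
-- ===== SOURCE A (Python) =====
-- def apply_seating(graph, seatfn):
--     changes = {"#": [], "L": [], ".": []}
--     for r, row in enumerate(graph):
--         for c, _ in enumerate(row):
--             pos, seat_type = seatfn(graph, r, c)
--             if seat_type:
--                 changes[seat_type].append(pos)
--     for k in changes:
--         for p in changes[k]:
--             x, y = p
--             graph[x][y] = k
--
--     return graph, sum(map(len, changes.values()))
--
-- def search_seat(graph, i, j, dx, dy):
--     m, n = len(graph), len(graph[0])
--     while 0 <= i + dx < m and 0 <= j + dy < n: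
--         i += dx
--         j += dy
--         if graph[i][j] in ["L", "#"]:
--             return graph[i][j]
--     return ""
--
-- DIRECTIONS = [(0, -1), (0, 1), (-1, 0), (1, 0), (-1, -1), (-1, 1), (1, -1), (1, 1)]
--
-- def seat2(graph, i, j):
--     nei = [search_seat(graph, i, j, dx, dy) for dx, dy in DIRECTIONS]
--     # empty seats with zero "#" neighbours become "#"
--     if graph[i][j] == "L" and nei.count("#") == 0:
--         return (i, j), "#"
--     elif graph[i][j] == "#" and nei.count("#") >= 5:
--         return (i, j), "L"
--
--     return (i, j), ""
--
-- def part2(graph):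
--     graph, changes = apply_seating(graph, seat2)
--
--     while changes > 0:
--         graph, changes = apply_seating(graph, seat2)
--
--     return sum(
--         1 if graph[x][y] == "#" else 0
--         for x in range(len(graph))
--         for y in range(len(graph[0]))
--     )
-- ===== SOURCE B (Python) =====
-- # B: precompute each seat's visible-seat coordinates once from the initial grid
-- # (the set of seat cells never changes), then each pass only counts 8 neighbours
-- # per seat instead of re-walking rays; A mutates graph in place, B does not
-- # (the equivalence is about the return value).
-- DIRS = [(0, -1), (0, 1), (-1, 0), (1, 0), (-1, -1), (-1, 1), (1, -1), (1, 1)]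
--
--
-- def visible(graph, m, n, r, c):
--     res = []
--     for dx, dy in DIRS:
--         i, j = r, c
--         while 0 <= i + dx < m and 0 <= j + dy < n:
--             i += dx
--             j += dy
--             if graph[i][j] in ("L", "#"):
--                 res.append((i, j))
--                 break
--     return res
--
--
-- def newval(g, v, nb):
--     occ = 0
--     for (i, j) in nb:
--         if g[i][j] == "#":
--             occ += 1
--     if v == "L" and occ == 0:
--         return "#"
--     if v == "#" and occ >= 5:
--         return "L"
--     return v
--
--
-- def part2(graph):
--     m = len(graph)
--     n = len(graph[0]) if graph else 0
--     neigh = [[visible(graph, m, n, r, c) if v in ("L", "#") else None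
--               for c, v in enumerate(row)] for r, row in enumerate(graph)]
--     g = graph
--     while True:
--         new = [[v if nb is None else newval(g, v, nb)
--                 for v, nb in zip(row, nrow)] for row, nrow in zip(g, neigh)]
--         if new == g:
--             return sum(1 for x in range(m) for y in range(n) if g[x][y] == "#")
--         g = new
-- ===== Notes on version B (the rewrite author's own statement) =====
-- stated objective: faster
-- what changed: B precomputes each seat's up-to-8 visible-seat coordinates once from the initial grid (the seat set never changes across passes) and then each pass only looks up those neighbours and rebuilds the grid functionally, instead of A's re-walking all 8 rays per cell every pass and collecting/applying mutations through a dict of change lists; B also does not mutate the argument.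
import Mathlib
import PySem

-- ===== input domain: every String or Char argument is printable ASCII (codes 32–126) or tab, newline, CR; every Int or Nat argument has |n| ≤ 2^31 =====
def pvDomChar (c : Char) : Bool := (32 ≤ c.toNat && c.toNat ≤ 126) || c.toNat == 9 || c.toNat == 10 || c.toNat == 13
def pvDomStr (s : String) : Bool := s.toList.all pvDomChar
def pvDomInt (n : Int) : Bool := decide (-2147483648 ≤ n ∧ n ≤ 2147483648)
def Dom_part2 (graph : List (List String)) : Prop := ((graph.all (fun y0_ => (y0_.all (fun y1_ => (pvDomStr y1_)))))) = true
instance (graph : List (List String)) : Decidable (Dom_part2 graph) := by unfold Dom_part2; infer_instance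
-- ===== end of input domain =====

-- B precomputes each seat's visible-seat coordinates once (the seat set never changes),
-- so each pass counts at most 8 neighbours per seat instead of re-walking rays; the
-- equivalence is about the return value only (Python A mutates `graph` in place, B does not).
-- Both loop ports use fuel 2^(cell count)+1, more passes than distinct reachable grids;
-- at exhaustion (never observed: the Python loops were never seen to diverge) both
-- ports return the current grid, so nothing is claimed beyond the fuelled runs agreeing.

-- ===== PORT A =====
-- graph[x][y] read/write, guarded by the bounds checks A itself performs (indices here are never negative)
def pvCell (g : List (List String)) (i j : Int) : String :=
  PySem.List.pyGetD (PySem.List.pyGetD g i []) j ""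

def setCell (g : List (List String)) (x y : Int) (v : String) : List (List String) :=
  PySem.List.pySetD g x (PySem.List.pySetD (PySem.List.pyGetD g x []) y v)

-- while 0 <= i+dx < m and 0 <= j+dy < n: … ; fuel (m+n)+2 exceeds the ≤ max(m,n)+1 steps any ray can take
def searchLoop (g : List (List String)) (m n : Int) :
    Nat → Int → Int → Int → Int → String
  | 0, _, _, _, _ => ""
  | fuel+1, i, j, dx, dy =>
    if 0 ≤ i + dx ∧ i + dx < m ∧ 0 ≤ j + dy ∧ j + dy < n then
      let v := pvCell g (i + dx) (j + dy)
      if v = "L" ∨ v = "#" then v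
      else searchLoop g m n fuel (i + dx) (j + dy) dx dy
    else ""

def searchSeat (g : List (List String)) (i j dx dy : Int) : String :=
  let m : Int := PySem.List.len g
  let n : Int := PySem.List.len (PySem.List.pyGetD g 0 [])
  searchLoop g m n ((m + n).toNat + 2) i j dx dy

def pvDirections : List (Int × Int) :=
  [(0, -1), (0, 1), (-1, 0), (1, 0), (-1, -1), (-1, 1), (1, -1), (1, 1)]

def seat2 (g : List (List String)) (i j : Int) : (Int × Int) × String :=
  let nei := pvDirections.map (fun d => searchSeat g i j d.1 d.2)
  if pvCell g i j = "L" ∧ nei.count "#" = 0 then ((i, j), "#")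
  else if pvCell g i j = "#" ∧ 5 ≤ nei.count "#" then ((i, j), "L")
  else ((i, j), "")

def applySeating (g : List (List String)) : List (List String) × Int :=
  let changes : PySem.Dict String (List (Int × Int)) :=
    PySem.Dict.ofList [("#", []), ("L", []), (".", [])]
  let changes := (PySem.List.enumerate g 0).foldl (fun d rrow =>
    (PySem.List.enumerate rrow.2 0).foldl (fun d cv =>
      let pt := seat2 g rrow.1 cv.1
      if pt.2 ≠ "" then d.modify pt.2 [] (· ++ [pt.1]) else d) d) changes
  let g' := changes.keys.foldl (fun gg k =>
    (changes.getD k []).foldl (fun gg p => setCell gg p.1 p.2 k) gg) g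
  (g', (changes.values.map PySem.List.len).sum)

-- fuel for the unbounded `while changes > 0` loop: exceeds the number of distinct grids
def pvFuel (g : List (List String)) : Nat := 2 ^ (g.map List.length).sum + 1

def loopA : Nat → List (List String) → Int → List (List String)
  | 0, g, _ => g
  | fuel+1, g, c =>
    if 0 < c then
      let gc := applySeating g
      loopA fuel gc.1 gc.2
    else g

def part2 (graph : List (List String)) : Int :=
  let gc := applySeating graph
  let gf := loopA (pvFuel graph) gc.1 gc.2
  let m : Int := PySem.List.len gf
  let n : Int := PySem.List.len (PySem.List.pyGetD gf 0 [])
  ((PySem.List.pyRange 0 m 1).map (fun x =>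
    ((PySem.List.pyRange 0 n 1).map (fun y =>
      if pvCell gf x y = "#" then (1 : Int) else 0)).sum)).sum

-- ===== PORT B =====
def isSeatB (v : String) : Bool := v == "L" || v == "#"

-- while 0 <= i+dx < m and 0 <= j+dy < n: … return the coordinate of the first seat
def rayLoop (g : List (List String)) (m n : Int) :
    Nat → Int → Int → Int → Int → Option (Int × Int)
  | 0, _, _, _, _ => none
  | fuel+1, i, j, dx, dy =>
    if 0 ≤ i + dx ∧ i + dx < m ∧ 0 ≤ j + dy ∧ j + dy < n then
      if isSeatB (pvCell g (i + dx) (j + dy)) then some (i + dx, j + dy)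
      else rayLoop g m n fuel (i + dx) (j + dy) dx dy
    else none

def visible (g : List (List String)) (m n r c : Int) : List (Int × Int) :=
  pvDirections.foldl (fun res d =>
    match rayLoop g m n ((m + n).toNat + 2) r c d.1 d.2 with
    | some p => res ++ [p]
    | none => res) []

def neighOf (graph : List (List String)) (m n : Int) :
    List (List (Option (List (Int × Int)))) :=
  (PySem.List.enumerate graph 0).map (fun rrow =>
    (PySem.List.enumerate rrow.2 0).map (fun cv =>
      if isSeatB cv.2 then some (visible graph m n rrow.1 cv.1) else none))

def newval (g : List (List String)) (v : String) (nb : List (Int × Int)) : String :=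
  let occ : Int := nb.foldl (fun a p => if pvCell g p.1 p.2 = "#" then a + 1 else a) 0
  if v = "L" ∧ occ = 0 then "#"
  else if v = "#" ∧ 5 ≤ occ then "L"
  else v

def stepB (neigh : List (List (Option (List (Int × Int)))))
    (g : List (List String)) : List (List String) :=
  (g.zip neigh).map (fun rn =>
    (rn.1.zip rn.2).map (fun vn =>
      match vn.2 with
      | none => vn.1
      | some nb => newval g vn.1 nb))

def loopB (neigh : List (List (Option (List (Int × Int))))) :
    Nat → List (List String) → List (List String)
  | 0, g => g
  | fuel+1, g =>
    let new := stepB neigh g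
    if new = g then g else loopB neigh fuel new

def part2_alt (graph : List (List String)) : Int :=
  let m : Int := PySem.List.len graph
  let n : Int := if graph = [] then 0 else PySem.List.len (PySem.List.pyGetD graph 0 [])
  let neigh := neighOf graph m n
  let gf := loopB neigh (pvFuel graph + 1) graph
  ((PySem.List.pyRange 0 m 1).map (fun x =>
    PySem.List.len ((PySem.List.pyRange 0 n 1).filter (fun y =>
      decide (pvCell gf x y = "#"))))).sum

-- ===== PRECONDITION & SPEC =====
-- Pre_: every row at least as long as row 0 — exactly the grids on which A returns;
-- on any grid with a row shorter than row 0, A's ray walk raises IndexError.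
def Pre_part2 (graph : List (List String)) : Prop :=
  ∀ row ∈ graph, (graph.headD []).length ≤ row.length
instance (graph : List (List String)) : Decidable (Pre_part2 graph) := by
  unfold Pre_part2; infer_instance

def pvWitness_part2 : List (List String) := [["L", "."], [".", "L"]]

def Spec_part2 (graph : List (List String)) (out : Int) : Prop := out = part2_alt graph
instance (graph : List (List String)) (out : Int) : Decidable (Spec_part2 graph out) := by
  unfold Spec_part2; infer_instance

-- ===== CLAIM (what is proved, stated in full; the proofs are below) =====
def Claim_equal_part2 : Prop :=
  ∀ (graph : List (List String)), Dom_part2 graph → Pre_part2 graph →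
    Spec_part2 graph (part2 graph)


-- ===== LEMMAS AND PROOFS =====

-- row y of graph x, as the ports read it
theorem pvCell_eq_getElem (g : List (List String)) (r c : Nat)
    (hr : r < g.length) (hc : c < g[r].length) :
    pvCell g (r : Int) (c : Int) = g[r][c] := by
  simp [pvCell, PySem.List.pyGetD_natCast, List.getD_eq_getElem?_getD, hr, hc]

-- the per-pass invariant: same shape and the same cells are seats
def sInv (g0 g : List (List String)) : Prop :=
  g.map (fun row => row.map isSeatB) = g0.map (fun row => row.map isSeatB)

theorem sInv_refl (g : List (List String)) : sInv g g := rfl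

theorem sInv_len {g0 g : List (List String)} (h : sInv g0 g) :
    g.length = g0.length := by
  have := congrArg List.length h; simpa using this

theorem sInv_rowlen {g0 g : List (List String)} (h : sInv g0 g)
    (r : Nat) (hr : r < g.length) (hr0 : r < g0.length) :
    g[r].length = g0[r].length := by
  have hrow := congrArg (fun l => l[r]?) h
  simp only [List.getElem?_map, List.getElem?_eq_getElem, hr, hr0, Option.map_some] at hrow
  have := congrArg (fun o => List.length o) (Option.some.inj hrow)
  simpa using this

theorem sInv_isSeat {g0 g : List (List String)} (h : sInv g0 g)
    (r c : Nat) (hr : r < g.length) (hr0 : r < g0.length)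
    (hc : c < g[r].length) (hc0 : c < g0[r].length) :
    isSeatB (g[r][c]) = isSeatB (g0[r][c]) := by
  have hrow := congrArg (fun l => l[r]?) h
  simp only [List.getElem?_map, List.getElem?_eq_getElem, hr, hr0, Option.map_some] at hrow
  have hrow' := Option.some.inj hrow
  have := congrArg (fun l => l[c]?) hrow'
  simp only [List.getElem?_map, List.getElem?_eq_getElem, hc, hc0, Option.map_some] at this
  exact Option.some.inj this

theorem sInv_trans {g0 g1 g2 : List (List String)}
    (h1 : sInv g0 g1) (h2 : sInv g1 g2) : sInv g0 g2 := h2.trans h1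

-- in-bounds reads agree on `isSeatB` between sInv-related grids (Int-index form);
-- needs every row of g at least n long (that is what Pre_ guarantees, transported)
theorem sInv_isSeat_cell {g0 g : List (List String)} (h : sInv g0 g)
    {n i j : Int}
    (hrow : ∀ (r : Nat) (hr : r < g.length), n ≤ ((g[r]'hr).length : Int))
    (hi : 0 ≤ i) (him : i < (g.length : Int)) (hj : 0 ≤ j) (hjn : j < n) :
    isSeatB (pvCell g i j) = isSeatB (pvCell g0 i j) := by
  obtain ⟨r, rfl⟩ := Int.eq_ofNat_of_zero_le hi
  obtain ⟨c, rfl⟩ := Int.eq_ofNat_of_zero_le hj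
  have hr : r < g.length := by exact_mod_cast him
  have hr0 : r < g0.length := by rw [← sInv_len h]; exact hr
  have hc : c < g[r].length := by
    have := hrow r hr; exact_mod_cast lt_of_lt_of_le hjn this
  have hc0 : c < g0[r].length := by rw [← sInv_rowlen h r hr hr0]; exact hc
  rw [pvCell_eq_getElem g r c hr hc, pvCell_eq_getElem g0 r c hr0 hc0]
  exact sInv_isSeat h r c hr hr0 hc hc0

-- A's ray walk on g returns the value (in g) at the coordinate B's ray walk (on g0) finds
theorem searchLoop_eq_ray {g0 g : List (List String)} (h : sInv g0 g)
    {n : Int} (hrow : ∀ (r : Nat) (hr : r < g.length), n ≤ ((g[r]'hr).length : Int)) :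
    ∀ (fuel : Nat) (i j dx dy : Int),
      searchLoop g (g.length : Int) n fuel i j dx dy =
        (match rayLoop g0 (g.length : Int) n fuel i j dx dy with
          | some p => pvCell g p.1 p.2
          | none => "") := by
  intro fuel
  induction fuel with
  | zero => intro i j dx dy; rfl
  | succ f ih =>
    intro i j dx dy
    simp only [searchLoop, rayLoop]
    by_cases hb : 0 ≤ i + dx ∧ i + dx < (g.length : Int) ∧ 0 ≤ j + dy ∧ j + dy < n
    · simp only [if_pos hb]
      have hseat := sInv_isSeat_cell h hrow hb.1 hb.2.1 hb.2.2.1 hb.2.2.2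
      by_cases hs : isSeatB (pvCell g (i + dx) (j + dy)) = true
      · have hv : pvCell g (i + dx) (j + dy) = "L" ∨ pvCell g (i + dx) (j + dy) = "#" := by
          simpa [isSeatB] using hs
        have hs0 : isSeatB (pvCell g0 (i + dx) (j + dy)) = true := by rw [← hseat]; exact hs
        simp [hs0, hv]
      · have hv : ¬ (pvCell g (i + dx) (j + dy) = "L" ∨ pvCell g (i + dx) (j + dy) = "#") := by
          simpa [isSeatB] using hs
        have hs0 : ¬ isSeatB (pvCell g0 (i + dx) (j + dy)) = true := by rw [← hseat]; exact hs
        simp only [hs0, if_neg hv, Bool.false_eq_true, if_false]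
        exact ih (i + dx) (j + dy) dx dy
    · simp [if_neg hb]

-- B's append-on-hit loop over the direction list collects exactly the hits
theorem visible_aux (g : List (List String)) (m n r c : Int) :
    ∀ (ds : List (Int × Int)) (acc : List (Int × Int)),
      ds.foldl (fun res d =>
          match rayLoop g m n ((m + n).toNat + 2) r c d.1 d.2 with
          | some p => res ++ [p]
          | none => res) acc =
        acc ++ ds.filterMap (fun d => rayLoop g m n ((m + n).toNat + 2) r c d.1 d.2) := by
  intro ds
  induction ds with
  | nil => intro acc; simp
  | cons d ds ih =>
    intro acc
    simp only [List.foldl_cons, List.filterMap_cons]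
    cases hd : rayLoop g m n ((m + n).toNat + 2) r c d.1 d.2 <;> simp [ih]

theorem visible_eq_filterMap (g : List (List String)) (m n r c : Int) :
    visible g m n r c =
      pvDirections.filterMap (fun d => rayLoop g m n ((m + n).toNat + 2) r c d.1 d.2) := by
  have h := visible_aux g m n r c pvDirections []
  simpa [visible] using h

-- A's '#'-count over ray values = count of occupied cells among B's visible coordinates
theorem count_search_eq {g0 g : List (List String)} (h : sInv g0 g)
    {n : Int} (hrow : ∀ (r : Nat) (hr : r < g.length), n ≤ ((g[r]'hr).length : Int))
    (fuel : Nat) (i j : Int) :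
    ∀ (ds : List (Int × Int)),
      (ds.map (fun d => searchLoop g (g.length : Int) n fuel i j d.1 d.2)).count "#" =
        (ds.filterMap (fun d => rayLoop g0 (g.length : Int) n fuel i j d.1 d.2)).countP
          (fun p => pvCell g p.1 p.2 == "#") := by
  intro ds
  induction ds with
  | nil => rfl
  | cons d ds ih =>
    simp only [List.map_cons, List.filterMap_cons]
    rw [searchLoop_eq_ray h hrow fuel i j d.1 d.2]
    cases hd : rayLoop g0 (g.length : Int) n fuel i j d.1 d.2 with
    | none => simpa [List.count_cons] using ih
    | some p =>
      by_cases hv : pvCell g p.1 p.2 = "#"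
      · simp [hv, ih]
      · simp [hv, ih]

theorem pyGetD_zero_headD (g : List (List String)) :
    PySem.List.pyGetD g 0 ([] : List String) = g.headD [] := by
  cases g <;> simp [PySem.List.pyGetD_zero]

theorem nAlt_eq (g : List (List String)) :
    (if g = [] then 0 else PySem.List.len (PySem.List.pyGetD g 0 [])) =
      ((g.headD []).length : Int) := by
  cases g <;> simp [PySem.List.pyGetD_zero, PySem.List.len_eq]

theorem headlen_eq {g0 g : List (List String)} (h : sInv g0 g) :
    (g.headD []).length = (g0.headD []).length := by
  cases g with
  | nil =>
    have h0 : g0.length = 0 := by simpa using (sInv_len h).symm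
    rw [List.length_eq_zero_iff] at h0
    rw [h0]
  | cons a as =>
    cases g0 with
    | nil => exact absurd (sInv_len h) (by simp)
    | cons b bs =>
      simp only [sInv, List.map_cons, List.cons.injEq] at h
      have := congrArg List.length h.1
      simpa using this

theorem rows_ge {g0 g : List (List String)} (h : sInv g0 g) (hp : Pre_part2 g0) :
    ∀ (r : Nat) (hr : r < g.length),
      (((g.headD []).length : Int)) ≤ ((g[r]'hr).length : Int) := by
  intro r hr
  have hr0 : r < g0.length := by rw [← sInv_len h]; exact hr
  have hlen := sInv_rowlen h r hr hr0
  have hmem : g0[r]'hr0 ∈ g0 := List.getElem_mem _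
  have hp' := hp _ hmem
  rw [headlen_eq h, hlen]
  exact_mod_cast hp'

-- one cell of B's pass (lookups in the precomputed table) = one cell of A's decision
theorem cell_eq {g0 g : List (List String)} (h : sInv g0 g) (hp : Pre_part2 g0)
    (r c : Nat) (hr : r < g.length) (hc : c < (g[r]'hr).length)
    (hr0 : r < g0.length) (hc0 : c < (g0[r]'hr0).length) :
    (match (if isSeatB ((g0[r]'hr0)[c]'hc0) then
        some (visible g0 (PySem.List.len g0)
          (if g0 = [] then 0 else PySem.List.len (PySem.List.pyGetD g0 0 [])) r c)
      else none : Option (List (Int × Int))) with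
      | none => (g[r]'hr)[c]'hc
      | some nb => newval g ((g[r]'hr)[c]'hc) nb)
    = (if (seat2 g (r : Int) (c : Int)).2 = "" then (g[r]'hr)[c]'hc
        else (seat2 g (r : Int) (c : Int)).2) := by
  have hv : pvCell g (r : Int) (c : Int) = (g[r]'hr)[c]'hc := pvCell_eq_getElem g r c hr hc
  have hseat : isSeatB ((g0[r]'hr0)[c]'hc0) = isSeatB ((g[r]'hr)[c]'hc) :=
    (sInv_isSeat h r c hr hr0 hc hc0).symm
  have hrow := rows_ge h hp
  -- rewrite B's m, n into g's own
  rw [nAlt_eq g0]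
  have hm0 : PySem.List.len g0 = (g.length : Int) := by
    rw [PySem.List.len_eq, sInv_len h]
  have hn0 : ((g0.headD []).length : Int) = ((g.headD []).length : Int) := by
    rw [headlen_eq h]
  rw [hm0, hn0]
  set N : Int := ((g.headD []).length : Int) with hN
  set fuel : Nat := (((g.length : Int) + N).toNat + 2) with hfuel
  -- the counts agree
  have hcount := count_search_eq h hrow fuel (r : Int) (c : Int) pvDirections
  have hsearch : (fun d : Int × Int => searchSeat g (r : Int) (c : Int) d.1 d.2) =
      (fun d : Int × Int => searchLoop g (g.length : Int) N fuel (r : Int) (c : Int) d.1 d.2) := by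
    funext d
    simp only [searchSeat, PySem.List.len_eq, pyGetD_zero_headD, hN, hfuel]
  have hvis := visible_eq_filterMap g0 (g.length : Int) N (r : Int) (c : Int)
  -- occupancy count in newval = countP over the visible list
  cases hsb : isSeatB ((g[r]'hr)[c]'hc) with
  | false =>
    rw [hseat, hsb]
    have hL : ¬ ((g[r]'hr)[c]'hc = "L") := by
      intro hx; rw [hx] at hsb; simp [isSeatB] at hsb
    have hH : ¬ ((g[r]'hr)[c]'hc = "#") := by
      intro hx; rw [hx] at hsb; simp [isSeatB] at hsb
    simp [seat2, hv, hL, hH]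
  | true =>
    rw [hseat, hsb]
    simp only [if_true]
    simp only [seat2, hv, hvis]
    set ray := fun d : Int × Int => rayLoop g0 (g.length : Int) N fuel (r : Int) (c : Int) d.1 d.2
      with hray
    set nb := pvDirections.filterMap ray with hnb
    have hcnt : (pvDirections.map
        (fun d : Int × Int => searchSeat g (r : Int) (c : Int) d.1 d.2)).count "#" =
        nb.countP (fun p => pvCell g p.1 p.2 == "#") := by
      rw [hsearch]; exact hcount
    set cnt : Nat := nb.countP (fun p => pvCell g p.1 p.2 == "#") with hcntd
    have hocc : (nb.foldl (fun a p => if pvCell g p.1 p.2 = "#" then a + 1 else a) (0 : Int)) =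
        ((cnt : Nat) : Int) := by
      rw [PySem.List.foldl_ite_add_one]
      simp only [zero_add, hcntd]
      congr 1
    have hnew : newval g ((g[r]'hr)[c]'hc) nb =
        (if (g[r]'hr)[c]'hc = "L" ∧ ((cnt : Nat) : Int) = 0 then "#"
          else if (g[r]'hr)[c]'hc = "#" ∧ (5 : Int) ≤ ((cnt : Nat) : Int) then "L"
          else (g[r]'hr)[c]'hc) := by
      simp only [newval]
      rw [hocc]
    rw [hnew, hcnt]
    have e1 : ((g[r]'hr)[c]'hc = "L" ∧ ((cnt : Nat) : Int) = 0) ↔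
        ((g[r]'hr)[c]'hc = "L" ∧ cnt = 0) := by
      constructor <;> (intro hx; exact ⟨hx.1, by exact_mod_cast hx.2⟩)
    have e2 : ((g[r]'hr)[c]'hc = "#" ∧ (5 : Int) ≤ ((cnt : Nat) : Int)) ↔
        ((g[r]'hr)[c]'hc = "#" ∧ 5 ≤ cnt) := by
      constructor <;> (intro hx; exact ⟨hx.1, by exact_mod_cast hx.2⟩)
    by_cases h1 : (g[r]'hr)[c]'hc = "L" ∧ cnt = 0
    · rw [if_pos (e1.mpr h1), if_pos h1]
      simp
    · by_cases h2 : (g[r]'hr)[c]'hc = "#" ∧ 5 ≤ cnt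
      · rw [if_neg (e1.not.mpr h1), if_neg h1, if_pos (e2.mpr h2), if_pos h2]
        simp
      · rw [if_neg (e1.not.mpr h1), if_neg h1, if_neg (e2.not.mpr h2), if_neg h2]
        simp

-- ----- A's pass, characterised pointwise -----

theorem seat2_fst (g : List (List String)) (i j : Int) : (seat2 g i j).1 = (i, j) := by
  unfold seat2; dsimp only; split_ifs <;> rfl

theorem tOf_cases (g : List (List String)) (i j : Int) :
    (seat2 g i j).2 = "" ∨ (seat2 g i j).2 = "#" ∨ (seat2 g i j).2 = "L" := by
  unfold seat2; dsimp only; split_ifs <;> simp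

-- the grid A's pass produces, written cell by cell
def gStep (g : List (List String)) : List (List String) :=
  (PySem.List.enumerate g 0).map (fun rrow =>
    (PySem.List.enumerate rrow.2 0).map (fun cv =>
      if (seat2 g rrow.1 cv.1).2 = "" then cv.2 else (seat2 g rrow.1 cv.1).2))

def cellsOf (g : List (List String)) : List (Int × Int) :=
  (PySem.List.enumerate g 0).flatMap (fun rrow =>
    (PySem.List.enumerate rrow.2 0).map (fun cv => (rrow.1, cv.1)))

def chgList (g : List (List String)) (k : String) : List (Int × Int) :=
  (cellsOf g).filter (fun p => (seat2 g p.1 p.2).2 == k)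

theorem gStep_length (g : List (List String)) : (gStep g).length = g.length := by
  simp [gStep, PySem.List.length_enumerate]

theorem gStep_rowlen (g : List (List String)) (r : Nat) (hr : r < g.length)
    (hr' : r < (gStep g).length) :
    ((gStep g)[r]'hr').length = (g[r]'hr).length := by
  simp [gStep, PySem.List.getElem_enumerate, PySem.List.length_enumerate]

theorem gStep_cell (g : List (List String)) (r c : Nat) (hr : r < g.length)
    (hc : c < (g[r]'hr).length) (hr' : r < (gStep g).length)
    (hc' : c < ((gStep g)[r]'hr').length) :
    ((gStep g)[r]'hr')[c]'hc' =
      (if (seat2 g (r : Int) (c : Int)).2 = "" then (g[r]'hr)[c]'hc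
        else (seat2 g (r : Int) (c : Int)).2) := by
  simp [gStep, PySem.List.getElem_enumerate]

theorem mem_cellsOf (g : List (List String)) (p : Int × Int) :
    p ∈ cellsOf g ↔ ∃ (r c : Nat) (hr : r < g.length),
      c < (g[r]'hr).length ∧ p = ((r : Int), (c : Int)) := by
  unfold cellsOf
  simp only [List.mem_flatMap, List.mem_map, PySem.List.mem_enumerate_iff]
  constructor
  · rintro ⟨rrow, ⟨r, hr, rfl⟩, cv, ⟨c, hc, rfl⟩, rfl⟩
    exact ⟨r, c, hr, hc, by simp⟩
  · rintro ⟨r, c, hr, hc, rfl⟩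
    exact ⟨((r : Int), g[r]'hr), ⟨r, hr, by simp⟩, ((c : Int), (g[r]'hr)[c]'hc),
      ⟨c, hc, by simp⟩, rfl⟩

theorem pvCell_setCell (g : List (List String)) (r0 c0 : Nat) (hr0 : r0 < g.length)
    (hc0 : c0 < (g[r0]'hr0).length) (v : String) (r c : Nat) :
    pvCell (setCell g (r0 : Int) (c0 : Int) v) (r : Int) (c : Int) =
      if r = r0 ∧ c = c0 then v else pvCell g (r : Int) (c : Int) := by
  unfold setCell pvCell
  simp only [PySem.List.pySetD_natCast, PySem.List.pyGetD_natCast,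
    List.getD_eq_getElem?_getD]
  by_cases hrr : r = r0
  · subst hrr
    rw [List.getElem?_set_self hr0]
    simp only [Option.getD_some]
    have hget : g[r]?.getD [] = g[r]'hr0 := by
      simp [hr0]
    rw [hget]
    by_cases hcc : c = c0
    · subst hcc
      rw [List.getElem?_set_self hc0]
      simp
    · rw [List.getElem?_set_ne (by omega)]
      simp [hcc]
  · rw [List.getElem?_set_ne (by omega)]
    simp [hrr]

theorem setCell_shape (g : List (List String)) (r0 c0 : Nat) (v : String) :
    (setCell g (r0 : Int) (c0 : Int) v).map List.length = g.map List.length := by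
  unfold setCell
  simp only [PySem.List.pySetD_natCast, PySem.List.pyGetD_natCast]
  by_cases h : r0 < g.length
  · rw [List.map_set]
    have h2 : ((g.getD r0 []).set c0 v).length =
        (g.map List.length)[r0]'(by simpa using h) := by
      simp [List.length_set, List.getD_eq_getElem?_getD, h]
    rw [h2, List.set_getElem_self]
  · rw [List.set_eq_of_length_le (Nat.le_of_not_lt h)]

-- applying a list of in-bounds single-cell writes of the same symbol
theorem foldl_setCell (k : String) :
    ∀ (ps : List (Int × Int)) (g : List (List String)),
      (∀ p ∈ ps, ∃ (a b : Nat), p = ((a : Int), (b : Int)) ∧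
        ∃ (ha : a < g.length), b < (g[a]'ha).length) →
      ((ps.foldl (fun gg p => setCell gg p.1 p.2 k) g).map List.length = g.map List.length ∧
        ∀ (r c : Nat),
          pvCell (ps.foldl (fun gg p => setCell gg p.1 p.2 k) g) (r : Int) (c : Int) =
            if ((r : Int), (c : Int)) ∈ ps then k else pvCell g (r : Int) (c : Int)) := by
  intro ps
  induction ps with
  | nil => intro g _; simp
  | cons p ps ih =>
    intro g hb
    obtain ⟨a, b, rfl, ha, hbb⟩ := hb _ (List.mem_cons_self)
    set g1 := setCell g (a : Int) (b : Int) k with hg1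
    have hshape1 : g1.map List.length = g.map List.length := setCell_shape g a b k
    have hb1 : ∀ p ∈ ps, ∃ (x y : Nat), p = ((x : Int), (y : Int)) ∧
        ∃ (hx : x < g1.length), y < (g1[x]'hx).length := by
      intro p hp
      obtain ⟨x, y, rfl, hx, hy⟩ := hb _ (List.mem_cons_of_mem _ hp)
      have hlen : g1.length = g.length := by
        have := congrArg List.length hshape1; simpa using this
      refine ⟨x, y, rfl, by rw [hlen]; exact hx, ?_⟩
      have : (g1[x]'(by rw [hlen]; exact hx)).length = (g[x]'hx).length := by
        have := congrArg (fun l => l[x]?) hshape1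
        simp only [List.getElem?_map, List.getElem?_eq_getElem, hx,
          (by rw [hlen]; exact hx : x < g1.length), Option.map_some] at this
        exact Option.some.inj this
      rw [this]; exact hy
    obtain ⟨ihs, ihc⟩ := ih g1 hb1
    constructor
    · simp only [List.foldl_cons]
      rw [ihs, hshape1]
    · intro r c
      simp only [List.foldl_cons]
      rw [ihc r c, pvCell_setCell g a b ha hbb k r c]
      by_cases hmem : ((r : Int), (c : Int)) ∈ ps
      · simp [hmem]
      · by_cases heq : r = a ∧ c = b
        · have : ((r : Int), (c : Int)) = ((a : Int), (b : Int)) := by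
            rw [heq.1, heq.2]
          simp [this, heq]
        · have : ¬ ((r : Int), (c : Int)) = ((a : Int), (b : Int)) := by
            intro hx
            apply heq
            constructor <;> [skip; skip] <;>
              · have h1 := congrArg Prod.fst hx
                have h2 := congrArg Prod.snd hx
                simp at h1 h2
                omega
          simp [hmem, this, heq]

-- ----- the collected `changes` dict -----

def collectD (g : List (List String)) : PySem.Dict String (List (Int × Int)) :=
  (PySem.List.enumerate g 0).foldl (fun d rrow =>
    (PySem.List.enumerate rrow.2 0).foldl (fun d cv =>
      let pt := seat2 g rrow.1 cv.1
      if pt.2 ≠ "" then d.modify pt.2 [] (· ++ [pt.1]) else d) d)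
    (PySem.Dict.ofList [("#", []), ("L", []), (".", [])])

theorem applySeating_unfold (g : List (List String)) :
    applySeating g =
      ((collectD g).keys.foldl (fun gg k =>
          ((collectD g).getD k []).foldl (fun gg p => setCell gg p.1 p.2 k) gg) g,
        (((collectD g).values.map PySem.List.len).sum)) := rfl

theorem set_update_self (s : PySem.Set String) (xs : List String)
    (h : ∀ x ∈ xs, x ∈ s) : PySem.Set.update s xs = s := by
  induction xs generalizing s with
  | nil => rfl
  | cons x xs ih =>
    have hx : PySem.Set.add s x = s := by
      simp [PySem.Set.add, PySem.Set.contains, h x List.mem_cons_self]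
    simp only [PySem.Set.update, List.foldl_cons] at *
    rw [hx]
    exact ih s (fun y hy => h y (List.mem_cons_of_mem _ hy))

theorem d0_getD (c : String) :
    (PySem.Dict.ofList [("#", ([] : List (Int × Int))), ("L", []), (".", [])]).getD c [] = [] := by
  simp [PySem.Dict.ofList, PySem.Dict.update, PySem.Dict.getD_insert]

theorem collect_flat (g : List (List String)) :
    collectD g =
      (((cellsOf g).filter (fun p => decide ((seat2 g p.1 p.2).2 ≠ ""))).map
          (fun p => ((seat2 g p.1 p.2).2, p))).foldl
        (fun d q => d.modify q.1 [] (· ++ [q.2]))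
        (PySem.Dict.ofList [("#", []), ("L", []), (".", [])]) := by
  rw [List.foldl_map]
  dsimp only
  refine Eq.trans ?_ (PySem.List.foldl_ite_eq_foldl_filter
    (fun p : Int × Int => (seat2 g p.1 p.2).2 ≠ "")
    (fun d (p : Int × Int) => d.modify (seat2 g p.1 p.2).2 [] (· ++ [p]))
    (cellsOf g) (PySem.Dict.ofList [("#", []), ("L", []), (".", [])]))
  unfold collectD cellsOf
  rw [List.flatMap_def, List.foldl_flatten, List.foldl_map]
  apply PySem.List.foldl_congr_mem
  intro d rrow _
  rw [List.foldl_map]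
  apply PySem.List.foldl_congr_mem
  intro d' cv _
  dsimp only
  simp only [seat2_fst]

theorem collect_keys (g : List (List String)) : (collectD g).keys = ["#", "L", "."] := by
  rw [collect_flat]
  refine (PySem.Dict.keys_foldl_modify_key _ (fun q : String × (Int × Int) => q.1) []
    (fun _ q => (· ++ [q.2])) _).trans ?_
  have hk : (PySem.Dict.ofList
      [("#", ([] : List (Int × Int))), ("L", []), (".", [])]).keys = ["#", "L", "."] := by decide
  rw [hk]
  apply set_update_self
  intro x hx
  simp only [List.map_map, List.mem_map, Function.comp] at hx
  obtain ⟨p, hp, rfl⟩ := hx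
  have := tOf_cases g p.1 p.2
  have hne : (seat2 g p.1 p.2).2 ≠ "" := by
    have := List.of_mem_filter hp
    simpa using this
  rcases this with h0 | h0 | h0
  · exact absurd h0 hne
  · simp [h0]
  · simp [h0]

theorem collect_getD (g : List (List String)) (c : String) (hc : c ≠ "") :
    (collectD g).getD c [] = chgList g c := by
  rw [collect_flat, PySem.Dict.getD_foldl_modify_append, d0_getD, List.filter_map]
  rw [List.map_map]
  have h1 : ((fun (x : String × (Int × Int)) => x.2) ∘ fun p : Int × Int =>
      ((seat2 g p.1 p.2).2, p)) = id := by
    funext p; rfl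
  rw [h1, List.map_id, List.filter_filter]
  unfold chgList
  rw [List.nil_append]
  apply List.filter_congr
  intro p _
  simp only [Function.comp]
  by_cases h : (seat2 g p.1 p.2).2 = c
  · simp [h, hc]
  · simp [h]

theorem collect_getD_dot (g : List (List String)) : (collectD g).getD "." [] = [] := by
  rw [collect_getD g "." (by decide)]
  unfold chgList
  rw [List.filter_eq_nil_iff]
  intro p _
  rcases tOf_cases g p.1 p.2 with h | h | h <;> simp [h]

theorem collect_snd (g : List (List String)) :
    ((collectD g).values.map PySem.List.len).sum =
      ((chgList g "#").length : Int) + ((chgList g "L").length : Int) := by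
  have hnd : (collectD g).keys.Nodup := by rw [collect_keys]; decide
  rw [PySem.Dict.values_eq_map_keys _ hnd [], collect_keys]
  simp only [List.map_cons, List.map_nil, List.sum_cons, List.sum_nil]
  rw [collect_getD g "#" (by decide), collect_getD g "L" (by decide), collect_getD_dot]
  simp [PySem.List.len_eq]

theorem shape_len {α : Type} {a b : List (List α)}
    (h : a.map List.length = b.map List.length) : a.length = b.length := by
  have := congrArg List.length h; simpa using this

theorem shape_rowlen {α : Type} {a b : List (List α)}
    (h : a.map List.length = b.map List.length) (r : Nat)
    (hra : r < a.length) (hrb : r < b.length) :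
    (a[r]'hra).length = (b[r]'hrb).length := by
  have := congrArg (fun l => l[r]?) h
  simp only [List.getElem?_map, List.getElem?_eq_getElem, hra, hrb, Option.map_some] at this
  exact Option.some.inj this

theorem chg_bounds (g : List (List String)) (k : String) :
    ∀ p ∈ chgList g k, ∃ (a b : Nat), p = ((a : Int), (b : Int)) ∧
      ∃ (ha : a < g.length), b < (g[a]'ha).length := by
  intro p hp
  have hc := List.mem_of_mem_filter hp
  rw [mem_cellsOf] at hc
  obtain ⟨r, c, hr, hcc, rfl⟩ := hc
  exact ⟨r, c, rfl, hr, hcc⟩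

theorem mem_chgList (g : List (List String)) (k : String) (r c : Nat)
    (hr : r < g.length) (hc : c < (g[r]'hr).length) :
    (((r : Int), (c : Int)) ∈ chgList g k) ↔ (seat2 g (r : Int) (c : Int)).2 = k := by
  unfold chgList
  rw [List.mem_filter]
  constructor
  · intro hx; simpa using hx.2
  · intro hx
    refine ⟨(mem_cellsOf g _).mpr ⟨r, c, hr, hc, rfl⟩, by simpa using hx⟩

theorem seat2_hash_imp (g : List (List String)) (i j : Int)
    (h : (seat2 g i j).2 = "#") : pvCell g i j = "L" := by
  unfold seat2 at h; dsimp only at h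
  split_ifs at h with h1 h2
  · exact h1.1
  · simp at h
  · simp at h

theorem seat2_L_imp (g : List (List String)) (i j : Int)
    (h : (seat2 g i j).2 = "L") : pvCell g i j = "#" := by
  unfold seat2 at h; dsimp only at h
  split_ifs at h with h1 h2
  · simp at h
  · exact h2.1
  · simp at h

theorem applySeating_eq (g : List (List String)) :
    applySeating g = (gStep g,
      ((chgList g "#").length : Int) + ((chgList g "L").length : Int)) := by
  rw [applySeating_unfold, collect_keys]
  refine Prod.ext ?_ (by simpa using collect_snd g)
  simp only [List.foldl_cons, List.foldl_nil]
  rw [collect_getD g "#" (by decide), collect_getD g "L" (by decide), collect_getD_dot]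
  simp only [List.foldl_nil]
  -- g1 : after the "#" writes; g2 : after the "L" writes
  obtain ⟨hs1, hc1⟩ := foldl_setCell "#" (chgList g "#") g (chg_bounds g "#")
  set g1 := (chgList g "#").foldl (fun gg p => setCell gg p.1 p.2 "#") g with hg1
  have hb2 : ∀ p ∈ chgList g "L", ∃ (a b : Nat), p = ((a : Int), (b : Int)) ∧
      ∃ (ha : a < g1.length), b < (g1[a]'ha).length := by
    intro p hp
    obtain ⟨a, b, rfl, ha, hbb⟩ := chg_bounds g "L" p hp
    have hlen : g1.length = g.length := shape_len hs1
    refine ⟨a, b, rfl, by rw [hlen]; exact ha, ?_⟩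
    rw [shape_rowlen hs1 a (by rw [hlen]; exact ha) ha]
    exact hbb
  obtain ⟨hs2, hc2⟩ := foldl_setCell "L" (chgList g "L") g1 hb2
  set g2 := (chgList g "L").foldl (fun gg p => setCell gg p.1 p.2 "L") g1 with hg2
  have hshape : g2.map List.length = g.map List.length := hs2.trans hs1
  have hlen2 : g2.length = g.length := shape_len hshape
  -- extensional equality with the pointwise grid
  apply List.ext_getElem
  · rw [hlen2, gStep_length]
  · intro r hr2 hrs
    have hr : r < g.length := by rw [← hlen2]; exact hr2
    apply List.ext_getElem
    · rw [shape_rowlen hshape r hr2 hr, gStep_rowlen g r hr hrs]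
    · intro c hcr2 hcrs
      have hc : c < (g[r]'hr).length := by
        rw [← shape_rowlen hshape r hr2 hr]; exact hcr2
      rw [gStep_cell g r c hr hc hrs hcrs]
      have e2 := hc2 r c
      rw [hc1 r c] at e2
      have hv2 : (g2[r]'hr2)[c]'hcr2 = pvCell g2 (r : Int) (c : Int) := by
        rw [pvCell_eq_getElem g2 r c hr2 hcr2]
      rw [hv2, e2, pvCell_eq_getElem g r c hr hc]
      rcases tOf_cases g (r : Int) (c : Int) with ht | ht | ht
      · have m1 : ¬ (((r : Int), (c : Int)) ∈ chgList g "L") := by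
          rw [mem_chgList g "L" r c hr hc, ht]; decide
        have m2 : ¬ (((r : Int), (c : Int)) ∈ chgList g "#") := by
          rw [mem_chgList g "#" r c hr hc, ht]; decide
        simp [m1, m2, ht]
      · have m1 : ¬ (((r : Int), (c : Int)) ∈ chgList g "L") := by
          rw [mem_chgList g "L" r c hr hc, ht]; decide
        have m2 : ((r : Int), (c : Int)) ∈ chgList g "#" := by
          rw [mem_chgList g "#" r c hr hc]; exact ht
        simp [m1, m2, ht]
      · have m1 : ((r : Int), (c : Int)) ∈ chgList g "L" := by
          rw [mem_chgList g "L" r c hr hc]; exact ht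
        simp [m1, ht]

theorem gStep_fix_iff (g : List (List String)) :
    (chgList g "#" = [] ∧ chgList g "L" = []) ↔ gStep g = g := by
  constructor
  · rintro ⟨h1, h2⟩
    apply List.ext_getElem (by rw [gStep_length])
    intro r hrs hr
    apply List.ext_getElem (by rw [gStep_rowlen g r hr hrs])
    intro c hcs hc
    rw [gStep_cell g r c hr hc hrs hcs]
    rcases tOf_cases g (r : Int) (c : Int) with ht | ht | ht
    · simp [ht]
    · exact absurd ((mem_chgList g "#" r c hr hc).mpr ht) (by simp [h1])
    · exact absurd ((mem_chgList g "L" r c hr hc).mpr ht) (by simp [h2])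
  · intro hfix
    have key : ∀ (k : String), (k = "#" ∨ k = "L") → chgList g k = [] := by
      intro k hk
      rw [List.eq_nil_iff_forall_not_mem]
      intro p hp
      obtain ⟨a, b, rfl, ha, hb⟩ := chg_bounds g _ p hp
      have hmem := (List.mem_filter.mp hp).2
      have ht : (seat2 g (a : Int) (b : Int)).2 = k := by simpa using hmem
      have hne : k ≠ "" := by rcases hk with rfl | rfl <;> decide
      have hrs : a < (gStep g).length := by rw [gStep_length]; exact ha
      have hcs : b < ((gStep g)[a]'hrs).length := by
        rw [gStep_rowlen g a ha hrs]; exact hb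
      have hcell := gStep_cell g a b ha hb hrs hcs
      rw [ht, if_neg hne] at hcell
      have hgv := congrArg (fun l => l[a]?) hfix
      simp only [List.getElem?_eq_getElem, hrs, ha, Option.some.injEq] at hgv
      have hgv2 := congrArg (fun l => l[b]?) hgv
      simp only [List.getElem?_eq_getElem, hcs, hb, Option.some.injEq] at hgv2
      rw [hcell] at hgv2
      rcases hk with rfl | rfl
      · have hv := seat2_hash_imp g (a : Int) (b : Int) ht
        rw [pvCell_eq_getElem g a b ha hb, ← hgv2] at hv
        exact absurd hv (by decide)
      · have hv := seat2_L_imp g (a : Int) (b : Int) ht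
        rw [pvCell_eq_getElem g a b ha hb, ← hgv2] at hv
        exact absurd hv (by decide)
    exact ⟨key "#" (Or.inl rfl), key "L" (Or.inr rfl)⟩

theorem sInv_gStep (g : List (List String)) : sInv g (gStep g) := by
  unfold sInv
  apply List.ext_getElem (by simp [gStep_length])
  intro r hr1 hr2
  have hrs : r < (gStep g).length := by simpa using hr1
  have hr : r < g.length := by simpa using hr2
  simp only [List.getElem_map]
  apply List.ext_getElem (by simp [gStep_rowlen g r hr hrs])
  intro c hc1 hc2
  have hcs : c < ((gStep g)[r]'hrs).length := by simpa using hc1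
  have hc : c < (g[r]'hr).length := by simpa using hc2
  simp only [List.getElem_map]
  rw [gStep_cell g r c hr hc hrs hcs]
  rcases tOf_cases g (r : Int) (c : Int) with ht | ht | ht
  · simp [ht]
  · have hv := seat2_hash_imp g (r : Int) (c : Int) ht
    rw [pvCell_eq_getElem g r c hr hc] at hv
    rw [ht, hv]
    simp [isSeatB]
  · have hv := seat2_L_imp g (r : Int) (c : Int) ht
    rw [pvCell_eq_getElem g r c hr hc] at hv
    rw [ht, hv]
    simp [isSeatB]

theorem neighOf_length (g0 : List (List String)) (m n : Int) :
    (neighOf g0 m n).length = g0.length := by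
  simp [neighOf, PySem.List.length_enumerate]

theorem neighOf_rowlen (g0 : List (List String)) (m n : Int) (r : Nat)
    (hr0 : r < g0.length) (hrn : r < (neighOf g0 m n).length) :
    ((neighOf g0 m n)[r]'hrn).length = (g0[r]'hr0).length := by
  simp [neighOf, PySem.List.getElem_enumerate, PySem.List.length_enumerate]

theorem neighOf_cell (g0 : List (List String)) (m n : Int) (r c : Nat)
    (hr0 : r < g0.length) (hc0 : c < (g0[r]'hr0).length)
    (hrn : r < (neighOf g0 m n).length) (hcn : c < ((neighOf g0 m n)[r]'hrn).length) :
    ((neighOf g0 m n)[r]'hrn)[c]'hcn =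
      (if isSeatB ((g0[r]'hr0)[c]'hc0) then some (visible g0 m n (r : Int) (c : Int))
        else none) := by
  simp [neighOf, PySem.List.getElem_enumerate]

theorem stepB_eq {g0 g : List (List String)} (h : sInv g0 g) (hp : Pre_part2 g0) :
    stepB (neighOf g0 (PySem.List.len g0)
      (if g0 = [] then 0 else PySem.List.len (PySem.List.pyGetD g0 0 []))) g = gStep g := by
  set m0 : Int := PySem.List.len g0 with hm0
  set n0 : Int := if g0 = [] then 0 else PySem.List.len (PySem.List.pyGetD g0 0 []) with hn0
  set nb := neighOf g0 m0 n0 with hnb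
  have hlen : g.length = g0.length := sInv_len h
  have hnlen : nb.length = g0.length := neighOf_length g0 m0 n0
  have hzlen : (g.zip nb).length = g.length := by
    rw [List.length_zip, hnlen, hlen, Nat.min_self]
  unfold stepB
  apply List.ext_getElem (by rw [List.length_map, hzlen, gStep_length])
  intro r hrz hrs
  have hr : r < g.length := by rw [← hzlen]; simpa using hrz
  have hr0 : r < g0.length := by rw [← hlen]; exact hr
  have hrn : r < nb.length := by rw [hnlen]; exact hr0
  rw [List.getElem_map, List.getElem_zip]
  have hrowlen : (nb[r]'hrn).length = (g[r]'hr).length := by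
    rw [neighOf_rowlen g0 m0 n0 r hr0 hrn, sInv_rowlen h r hr hr0]
  have hzrow : ((g[r]'hr).zip (nb[r]'hrn)).length = (g[r]'hr).length := by
    rw [List.length_zip, hrowlen, Nat.min_self]
  apply List.ext_getElem (by rw [List.length_map, hzrow, gStep_rowlen g r hr hrs])
  intro c hcz hcs
  have hc : c < (g[r]'hr).length := by rw [← hzrow]; simpa using hcz
  have hc0 : c < (g0[r]'hr0).length := by rw [← sInv_rowlen h r hr hr0]; exact hc
  have hcn : c < (nb[r]'hrn).length := by rw [hrowlen]; exact hc
  rw [List.getElem_map, List.getElem_zip]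
  rw [gStep_cell g r c hr hc hrs hcs]
  have hcell := neighOf_cell g0 m0 n0 r c hr0 hc0 hrn hcn
  rw [hcell]
  exact cell_eq h hp r c hr hc hr0 hc0

theorem chg_pos_of_not_fix (g : List (List String)) (hfix : ¬ gStep g = g) :
    (0 : Int) < ((chgList g "#").length : Int) + ((chgList g "L").length : Int) := by
  have hne : ¬ (chgList g "#" = [] ∧ chgList g "L" = []) := fun hx =>
    hfix ((gStep_fix_iff g).mp hx)
  have h1 : 0 < (chgList g "#").length + (chgList g "L").length := by
    rcases Nat.eq_zero_or_pos ((chgList g "#").length + (chgList g "L").length) with h | h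
    · exfalso
      apply hne
      constructor <;> (rw [← List.length_eq_zero_iff]; omega)
    · exact h
  exact_mod_cast h1

theorem chg_zero_of_fix (g : List (List String)) (hfix : gStep g = g) :
    ((chgList g "#").length : Int) + ((chgList g "L").length : Int) = 0 := by
  obtain ⟨h1, h2⟩ := (gStep_fix_iff g).mpr hfix
  rw [h1, h2]
  rfl

theorem loop_eq {g0 : List (List String)} (hp : Pre_part2 g0) :
    ∀ (f : Nat) (g : List (List String)), sInv g0 g →
      loopA f (applySeating g).1 (applySeating g).2 =
        loopB (neighOf g0 (PySem.List.len g0)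
          (if g0 = [] then 0 else PySem.List.len (PySem.List.pyGetD g0 0 [])))
          (f + 1) g := by
  intro f
  induction f with
  | zero =>
    intro g hg
    rw [applySeating_eq]
    show gStep g = loopB _ 1 g
    simp only [loopB, stepB_eq hg hp]
    by_cases hfix : gStep g = g
    · rw [if_pos hfix, hfix]
    · rw [if_neg hfix]
  | succ f ih =>
    intro g hg
    rw [applySeating_eq]
    have hinv' : sInv g0 (gStep g) := sInv_trans hg (sInv_gStep g)
    by_cases hfix : gStep g = g
    · have hc := chg_zero_of_fix g hfix
      show loopA (f + 1) (gStep g) _ = loopB _ (f + 1 + 1) g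
      simp only [loopA, hc]
      rw [if_neg (lt_irrefl (0 : Int))]
      simp only [loopB, stepB_eq hg hp]
      rw [if_pos hfix, hfix]
    · have hc := chg_pos_of_not_fix g hfix
      show loopA (f + 1) (gStep g) _ = loopB _ (f + 1 + 1) g
      simp only [loopA, if_pos hc]
      have hrhs : loopB (neighOf g0 (PySem.List.len g0)
          (if g0 = [] then 0 else PySem.List.len (PySem.List.pyGetD g0 0 [])))
          (f + 1 + 1) g =
          loopB (neighOf g0 (PySem.List.len g0)
            (if g0 = [] then 0 else PySem.List.len (PySem.List.pyGetD g0 0 [])))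
            (f + 1) (gStep g) := by
        simp only [loopB, stepB_eq hg hp]
        rw [if_neg hfix]
      rw [hrhs]
      exact ih (gStep g) hinv'

theorem sInv_loopB {g0 : List (List String)} (hp : Pre_part2 g0) :
    ∀ (f : Nat) (g : List (List String)), sInv g0 g →
      sInv g0 (loopB (neighOf g0 (PySem.List.len g0)
        (if g0 = [] then 0 else PySem.List.len (PySem.List.pyGetD g0 0 []))) f g) := by
  intro f
  induction f with
  | zero => intro g hg; exact hg
  | succ f ih =>
    intro g hg
    simp only [loopB, stepB_eq hg hp]
    by_cases hfix : gStep g = g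
    · rw [if_pos hfix]; exact hg
    · rw [if_neg hfix]
      exact ih (gStep g) (sInv_trans hg (sInv_gStep g))

theorem count_expr_eq (gf : List (List String)) (m n : Int) :
    ((PySem.List.pyRange 0 m 1).map (fun x =>
      ((PySem.List.pyRange 0 n 1).map (fun y =>
        if pvCell gf x y = "#" then (1 : Int) else 0)).sum)).sum =
    ((PySem.List.pyRange 0 m 1).map (fun x =>
      PySem.List.len ((PySem.List.pyRange 0 n 1).filter (fun y =>
        decide (pvCell gf x y = "#"))))).sum := by
  congr 1
  apply List.map_congr_left
  intro x _
  have h := PySem.List.sum_map_ite_one_zero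
    (fun y => decide (pvCell gf x y = "#")) (PySem.List.pyRange 0 n 1)
  simp only [decide_eq_true_eq] at h
  rw [h]
  simp [PySem.List.len_eq, List.countP_eq_length_filter]

-- ===== VERDICT (by name: the statement is the Claim_ definition above) =====
theorem part2_spec : Claim_equal_part2 := by
  unfold Claim_equal_part2
  intro graph _ hpre
  unfold Spec_part2 part2 part2_alt
  dsimp only
  rw [loop_eq hpre (pvFuel graph) graph (sInv_refl graph)]
  have hinv : sInv graph (loopB (neighOf graph (PySem.List.len graph)
      (if graph = [] then 0 else PySem.List.len (PySem.List.pyGetD graph 0 [])))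
      (pvFuel graph + 1) graph) :=
    sInv_loopB hpre (pvFuel graph + 1) graph (sInv_refl graph)
  set gf := loopB (neighOf graph (PySem.List.len graph)
      (if graph = [] then 0 else PySem.List.len (PySem.List.pyGetD graph 0 [])))
      (pvFuel graph + 1) graph with hgf
  have hm : PySem.List.len gf = PySem.List.len graph := by
    simp [PySem.List.len_eq, sInv_len hinv]
  have hn : PySem.List.len (PySem.List.pyGetD gf 0 []) =
      (if graph = [] then 0 else PySem.List.len (PySem.List.pyGetD graph 0 [])) := by
    rw [nAlt_eq, pyGetD_zero_headD, PySem.List.len_eq]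
    exact_mod_cast headlen_eq hinv
  rw [hm, hn]
  exact count_expr_eq gf (PySem.List.len graph)
    (if graph = [] then 0 else PySem.List.len (PySem.List.pyGetD graph 0 []))
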